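-- pv_equiv track=rewrite | github.com/misaeldasilva123ms96-commits/Projeto-Omni | backend/python/brain/runtime/goals/goal_factory.py | _allowed_subsystems_from_tools
-- ===== SOURCE A (Python) =====
-- def _allowed_subsystems_from_tools(selected_tools: list[str]) -> list[str]:
--     subsystems: set[str] = set()
--     for tool in selected_tools:
--         if tool in {"filesystem_read", "read_file", "filesystem_write", "filesystem_patch_set", "grep_search", "glob_search"}:
--             subsystems.add("planning")
--             subsystems.add("orchestration")
--             subsystems.add("continuation")
--         if tool in {"verification_runner", "test_runner"}:
--             subsystems.add("continuation")
--         if tool in {"filesystem_patch_set", "filesystem_write"}: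
--             subsystems.add("self_repair")
--     return sorted(subsystems)
-- ===== SOURCE B (Python) =====
-- def _allowed_subsystems_from_tools(selected_tools: list[str]) -> list[str]:
--     tset = set(selected_tools)
--     subsystems: set[str] = set()
--     if tset & {"filesystem_read", "read_file", "filesystem_write", "filesystem_patch_set", "grep_search", "glob_search"}:
--         subsystems |= {"planning", "orchestration", "continuation"}
--     if tset & {"verification_runner", "test_runner"}:
--         subsystems.add("continuation")
--     if tset & {"filesystem_patch_set", "filesystem_write"}:
--         subsystems.add("self_repair")
--     return sorted(subsystems)
-- ===== Notes on version B (the rewrite author's own statement) =====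
-- stated objective: simpler
-- what changed: Replaces the per-tool loop with three fixed set-intersection guards over set(selected_tools): each guard fires at most once and adds its whole subsystem group, instead of branching on every element.
import Mathlib
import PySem

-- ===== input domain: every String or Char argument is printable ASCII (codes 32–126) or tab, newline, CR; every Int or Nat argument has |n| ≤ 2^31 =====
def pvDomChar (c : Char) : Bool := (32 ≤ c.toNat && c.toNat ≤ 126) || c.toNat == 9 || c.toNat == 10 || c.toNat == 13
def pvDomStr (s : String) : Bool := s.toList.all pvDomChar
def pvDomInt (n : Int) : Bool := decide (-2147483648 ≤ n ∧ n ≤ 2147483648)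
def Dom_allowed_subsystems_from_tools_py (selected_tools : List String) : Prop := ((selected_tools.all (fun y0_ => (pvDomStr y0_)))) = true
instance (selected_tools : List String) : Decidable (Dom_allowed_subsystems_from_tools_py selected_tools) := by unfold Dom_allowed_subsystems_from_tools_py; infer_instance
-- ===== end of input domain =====

-- B replaces A's per-tool loop by three whole-set intersection guards over set(selected_tools); objective: simpler.

-- the three tool sets both versions test against
def pvS1 : List String := ["filesystem_read", "read_file", "filesystem_write", "filesystem_patch_set", "grep_search", "glob_search"]
def pvS2 : List String := ["verification_runner", "test_runner"]
def pvS3 : List String := ["filesystem_patch_set", "filesystem_write"]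

-- ===== PORT A =====
-- loop body of A's 'for tool in selected_tools'
def pvStepA (subsystems : PySem.Set String) (tool : String) : PySem.Set String :=
  let subsystems :=
    if tool ∈ pvS1 then
      PySem.Set.add (PySem.Set.add (PySem.Set.add subsystems "planning") "orchestration") "continuation"
    else subsystems
  let subsystems :=
    if tool ∈ pvS2 then PySem.Set.add subsystems "continuation"
    else subsystems
  if tool ∈ pvS3 then PySem.Set.add subsystems "self_repair"
  else subsystems

def allowed_subsystems_from_tools_py (selected_tools : List String) : List String :=
  let subsystems : PySem.Set String := selected_tools.foldl pvStepA PySem.Set.empty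
  PySem.List.sorted subsystems (fun x => x) false

-- ===== PORT B =====
def allowed_subsystems_from_tools_py_alt (selected_tools : List String) : List String :=
  let tset : PySem.Set String := PySem.Set.ofList selected_tools
  let subsystems : PySem.Set String := PySem.Set.empty
  let subsystems :=
    if PySem.Set.inter tset (PySem.Set.ofList pvS1) ≠ [] then
      PySem.Set.update subsystems ["planning", "orchestration", "continuation"]
    else subsystems
  let subsystems :=
    if PySem.Set.inter tset (PySem.Set.ofList pvS2) ≠ [] then
      PySem.Set.add subsystems "continuation"
    else subsystems
  let subsystems :=
    if PySem.Set.inter tset (PySem.Set.ofList pvS3) ≠ [] then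
      PySem.Set.add subsystems "self_repair"
    else subsystems
  PySem.List.sorted subsystems (fun x => x) false

-- ===== PRECONDITION & SPEC =====
def Spec_allowed_subsystems_from_tools_py (selected_tools : List String) (out : List String) : Prop := out = allowed_subsystems_from_tools_py_alt selected_tools
instance (selected_tools : List String) (out : List String) : Decidable (Spec_allowed_subsystems_from_tools_py selected_tools out) := by unfold Spec_allowed_subsystems_from_tools_py; infer_instance

-- ===== CLAIM (what is proved, stated in full; the proofs are below) =====
def Claim_equal_allowed_subsystems_from_tools_py : Prop := ∀ (selected_tools : List String), Dom_allowed_subsystems_from_tools_py selected_tools → Spec_allowed_subsystems_from_tools_py selected_tools (allowed_subsystems_from_tools_py selected_tools)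

-- ===== LEMMAS AND PROOFS =====

lemma pv_shuffle (A P Q R a b c B C D : Prop) :
    ((A ∨ (a ∧ P) ∨ (b ∧ Q) ∨ (c ∧ R)) ∨ (B ∧ P) ∨ (C ∧ Q) ∨ (D ∧ R)) ↔
      (A ∨ ((a ∨ B) ∧ P) ∨ ((b ∨ C) ∧ Q) ∨ ((c ∨ D) ∧ R)) := by
  constructor
  · rintro ((h | ⟨h, hp⟩ | ⟨h, hq⟩ | ⟨h, hr⟩) | ⟨h, hp⟩ | ⟨h, hq⟩ | ⟨h, hr⟩)
    · exact Or.inl h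
    · exact Or.inr (Or.inl ⟨Or.inl h, hp⟩)
    · exact Or.inr (Or.inr (Or.inl ⟨Or.inl h, hq⟩))
    · exact Or.inr (Or.inr (Or.inr ⟨Or.inl h, hr⟩))
    · exact Or.inr (Or.inl ⟨Or.inr h, hp⟩)
    · exact Or.inr (Or.inr (Or.inl ⟨Or.inr h, hq⟩))
    · exact Or.inr (Or.inr (Or.inr ⟨Or.inr h, hr⟩))
  · rintro (h | ⟨h | h, hp⟩ | ⟨h | h, hq⟩ | ⟨h | h, hr⟩)
    · exact Or.inl (Or.inl h)
    · exact Or.inl (Or.inr (Or.inl ⟨h, hp⟩))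
    · exact Or.inr (Or.inl ⟨h, hp⟩)
    · exact Or.inl (Or.inr (Or.inr (Or.inl ⟨h, hq⟩)))
    · exact Or.inr (Or.inr (Or.inl ⟨h, hq⟩))
    · exact Or.inl (Or.inr (Or.inr (Or.inr ⟨h, hr⟩)))
    · exact Or.inr (Or.inr (Or.inr ⟨h, hr⟩))

lemma mem_stepA (acc : PySem.Set String) (t x : String) :
    x ∈ pvStepA acc t ↔ x ∈ acc ∨
      (t ∈ pvS1 ∧ (x = "planning" ∨ x = "orchestration" ∨ x = "continuation")) ∨
      (t ∈ pvS2 ∧ x = "continuation") ∨ (t ∈ pvS3 ∧ x = "self_repair") := by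
  unfold pvStepA
  split_ifs <;> simp only [PySem.Set.mem_add] <;> tauto

-- membership characterization of A's accumulated set
lemma memA (ts : List String) (acc : PySem.Set String) (x : String) :
    x ∈ ts.foldl pvStepA acc ↔ x ∈ acc ∨
      ((∃ t ∈ ts, t ∈ pvS1) ∧ (x = "planning" ∨ x = "orchestration" ∨ x = "continuation")) ∨
      ((∃ t ∈ ts, t ∈ pvS2) ∧ x = "continuation") ∨
      ((∃ t ∈ ts, t ∈ pvS3) ∧ x = "self_repair") := by
  induction ts generalizing acc with
  | nil => simp
  | cons t ts ih =>
    rw [List.foldl_cons, ih, mem_stepA]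
    simp only [List.mem_cons, exists_eq_or_imp]
    exact pv_shuffle _ _ _ _ _ _ _ _ _ _

lemma nodup_stepA (acc : PySem.Set String) (t : String) (h : acc.Nodup) :
    (pvStepA acc t).Nodup := by
  unfold pvStepA
  split_ifs <;>
    solve
    | exact h
    | repeat (first | assumption | apply PySem.Set.nodup_add)

lemma nodupA (ts : List String) (acc : PySem.Set String) (h : acc.Nodup) :
    (ts.foldl pvStepA acc).Nodup := by
  induction ts generalizing acc with
  | nil => exact h
  | cons t ts ih => exact ih _ (nodup_stepA acc t h)

lemma inter_ofList_ne_nil (xs S : List String) :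
    PySem.Set.inter (PySem.Set.ofList xs) (PySem.Set.ofList S) ≠ [] ↔ ∃ t ∈ xs, t ∈ S := by
  constructor
  · intro hne
    obtain ⟨y, hy⟩ := List.exists_mem_of_ne_nil _ hne
    simp only [PySem.Set.mem_inter, PySem.Set.mem_ofList] at hy
    exact ⟨y, hy.1, hy.2⟩
  · rintro ⟨t, h1, h2⟩ he
    have ht : t ∈ PySem.Set.inter (PySem.Set.ofList xs) (PySem.Set.ofList S) := by
      simp only [PySem.Set.mem_inter, PySem.Set.mem_ofList]
      exact ⟨h1, h2⟩
    rw [he] at ht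
    simp at ht

set_option maxHeartbeats 1000000 in
-- ===== VERDICT (by name: the statement is the Claim_ definition above) =====
theorem allowed_subsystems_from_tools_py_spec : Claim_equal_allowed_subsystems_from_tools_py := by
  intro ts _
  show _ = _
  unfold allowed_subsystems_from_tools_py allowed_subsystems_from_tools_py_alt
  apply PySem.List.sorted_eq_sorted_of_perm _ _ _ (fun a b h => h)
  rw [List.perm_ext_iff_of_nodup (nodupA ts PySem.Set.empty List.nodup_nil)]
  · intro x
    rw [memA]
    by_cases h1 : ∃ t ∈ ts, t ∈ pvS1 <;>
    by_cases h2 : ∃ t ∈ ts, t ∈ pvS2 <;>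
    by_cases h3 : ∃ t ∈ ts, t ∈ pvS3 <;>
      simp only [inter_ofList_ne_nil, h1, h2, h3, not_false_iff,
        ne_eq, PySem.Set.mem_add, PySem.Set.mem_update, PySem.Set.empty,
        List.not_mem_nil, List.mem_cons] <;>
      simp [h1, h2, h3] <;> tauto
  · split_ifs <;>
      solve
      | exact List.nodup_nil
      | repeat (first
          | exact List.nodup_nil
          | apply PySem.Set.nodup_add
          | apply PySem.Set.nodup_update)
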